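-- pv_equiv track=rewrite | github.com/marianogg9/00_basic_python | 4_data_structures/2_dictionary/solutions/exercise_2.py | exercise_2
-- ===== SOURCE A (Python) =====
-- def exercise_2(dict1):
--     dico = {}
--
--     for key, value in dict1.items():
--         if value not in dico:
--             dico[value] = [key]
--         else:
--             dico[value].append(key)
--
--     for k, v in dico.items():
--         if len(v) > 1:
--             for vv in v:
--                 dict1.pop((vv))
--
--     return dict1
-- ===== SOURCE B (Python) =====
-- def exercise_2(dict1):
--     items = list(dict1.items())
--     for k, v in items:
--         if any(k2 != k and v2 == v for k2, v2 in items):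
--             dict1.pop(k)
--     return dict1
-- ===== Notes on version B (the rewrite author's own statement) =====
-- stated objective: alternative
-- what changed: A builds an auxiliary value->list-of-keys dict and pops keys in a nested loop over the grouped lists; B uses no auxiliary structure at all: it snapshots the items and, for each entry, does a brute-force pairwise scan for any other entry with the same value, popping the key if one exists.
import Mathlib
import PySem

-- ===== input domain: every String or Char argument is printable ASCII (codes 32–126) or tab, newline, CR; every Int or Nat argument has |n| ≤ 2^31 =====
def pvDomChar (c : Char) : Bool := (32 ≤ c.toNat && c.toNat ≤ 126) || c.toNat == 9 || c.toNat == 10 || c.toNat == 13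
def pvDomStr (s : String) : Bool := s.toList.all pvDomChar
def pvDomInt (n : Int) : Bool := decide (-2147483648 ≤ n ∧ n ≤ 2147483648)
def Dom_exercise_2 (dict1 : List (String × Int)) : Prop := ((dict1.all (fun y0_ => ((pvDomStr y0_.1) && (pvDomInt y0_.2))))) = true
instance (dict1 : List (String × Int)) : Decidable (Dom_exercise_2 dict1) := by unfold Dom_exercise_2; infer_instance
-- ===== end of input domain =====

-- B replaces A's value->list-of-keys grouping dict and nested removal loop by a brute-force
-- pairwise scan with no auxiliary structure: for each entry it looks for any OTHER entry with the
-- same value and pops the key if one exists (alternative; quadratic where A is linear); like A,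
-- B pops from dict1 in place and returns the same object — the theorem is about the returned value.


-- ===== PORT A =====
def exercise_2 (dict1 : List (String × Int)) : List (String × Int) :=
  -- dico = {}; for key, value in dict1.items(): if value not in dico: dico[value] = [key] else: dico[value].append(key)
  let dico : PySem.Dict Int (List String) :=
    dict1.foldl (fun dico kv =>
      if dico.contains kv.2 = false then dico.insert kv.2 [kv.1]
      else dico.modify kv.2 [] (fun l => l ++ [kv.1])) PySem.Dict.empty
  -- for k, v in dico.items(): if len(v) > 1: for vv in v: dict1.pop(vv)
  let d : PySem.Dict String Int :=
    dico.items.foldl (fun d vks =>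
      if 1 < vks.2.length then vks.2.foldl (fun d vv => d.erase vv) d else d)
      (PySem.Dict.mk dict1)
  d.items

-- ===== PORT B =====
def exercise_2_alt (dict1 : List (String × Int)) : List (String × Int) :=
  -- items = list(dict1.items())
  let items := dict1
  -- for k, v in items: if any(k2 != k and v2 == v for k2, v2 in items): dict1.pop(k)
  -- (the popped key is always present under Pre_: keys are distinct, each key popped at most once)
  let d : PySem.Dict String Int :=
    items.foldl (fun d kv =>
      if items.any (fun q => q.1 != kv.1 && q.2 == kv.2) then d.erase kv.1 else d)
      (PySem.Dict.mk dict1)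
  d.items

-- ===== PRECONDITION & SPEC =====
-- The Python argument is a dict, whose keys are necessarily distinct; an association list with a
-- duplicated key does not represent any input A can receive, so it is excluded.
def Pre_exercise_2 (dict1 : List (String × Int)) : Prop := (dict1.map Prod.fst).Nodup
instance (dict1 : List (String × Int)) : Decidable (Pre_exercise_2 dict1) := by unfold Pre_exercise_2; infer_instance

def pvWitness_exercise_2 : (List (String × Int)) := [("a", 1), ("b", 2), ("c", 1), ("d", 3)]

def Spec_exercise_2 (dict1 : List (String × Int)) (out : List (String × Int)) : Prop := out = exercise_2_alt dict1
instance (dict1 : List (String × Int)) (out : List (String × Int)) : Decidable (Spec_exercise_2 dict1 out) := by unfold Spec_exercise_2; infer_instance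

-- ===== CLAIM (what is proved, stated in full; the proofs are below) =====
def Claim_equal_exercise_2 : Prop := ∀ (dict1 : List (String × Int)), Dom_exercise_2 dict1 → Pre_exercise_2 dict1 → Spec_exercise_2 dict1 (exercise_2 dict1)

-- ===== LEMMAS AND PROOFS =====

-- A's grouping step is exactly Dict.modify (the 'not in dico' branch inserts f([]) = [key]).
theorem stepA_eq_modify (dico : PySem.Dict Int (List String)) (kv : String × Int) :
    (if dico.contains kv.2 = false then dico.insert kv.2 [kv.1]
     else dico.modify kv.2 [] (fun l => l ++ [kv.1]))
    = dico.modify kv.2 [] (fun l => l ++ [kv.1]) := by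
  by_cases h : dico.contains kv.2 = false
  · simp [h, PySem.Dict.modify, PySem.Dict.getD_of_not_contains dico [] h]
  · simp [h]

-- The grouped list for value v is the keys of the pairs of l whose value is v, in order.
theorem dico_getD (l : List (String × Int)) (v : Int) :
    (l.foldl (fun dico kv => dico.modify kv.2 [] (fun s => s ++ [kv.1])) PySem.Dict.empty).getD v []
    = (l.filter (fun p => p.2 == v)).map Prod.fst := by
  have h := PySem.Dict.getD_foldl_modify_append (l := l.map (fun p => (p.2, p.1)))
      (d := (PySem.Dict.empty : PySem.Dict Int (List String))) (c := v)
  rw [List.foldl_map] at h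
  simpa [List.filter_map, List.map_map, Function.comp] using h

-- A sequence of erases is one filter on the key.
theorem foldl_erase_items (ks : List String) (d : PySem.Dict String Int) :
    (ks.foldl (fun d k => d.erase k) d).items = d.items.filter (fun p => decide (p.1 ∉ ks)) := by
  induction ks generalizing d with
  | nil => simp
  | cons k ks ih =>
    rw [List.foldl_cons, ih]
    show (PySem.Dict.erase d k).items.filter _ = _
    simp only [PySem.Dict.erase, List.filter_filter]
    refine List.filter_congr ?_
    intro p _
    by_cases h1 : p.1 = k <;> by_cases h2 : p.1 ∈ ks <;> simp [h1, h2]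

-- A's removal loop over the groups is one filter.
theorem foldA_items (gs : List (Int × List String)) (d : PySem.Dict String Int) :
    (gs.foldl (fun d g => if 1 < g.2.length then g.2.foldl (fun d k => d.erase k) d else d) d).items
    = d.items.filter (fun p => decide (∀ g ∈ gs, 1 < g.2.length → p.1 ∉ g.2)) := by
  induction gs generalizing d with
  | nil => simp
  | cons g gs ih =>
    rw [List.foldl_cons]
    by_cases h : 1 < g.2.length
    · rw [if_pos h, ih, foldl_erase_items, List.filter_filter]
      refine List.filter_congr ?_
      intro p _
      by_cases hm : p.1 ∈ g.2 <;> simp [hm, h]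
    · rw [if_neg h, ih]
      refine List.filter_congr ?_
      intro p _
      simp only [List.mem_cons, decide_eq_decide]
      constructor
      · intro hp g' hg'
        rcases hg' with rfl | hg'
        · intro hlen; exact absurd hlen h
        · exact hp g' hg'
      · intro hp g' hg'
        exact hp g' (Or.inr hg')

-- B's removal loop, with an arbitrary per-entry condition c, is one filter on the key.
theorem foldB_items (c : String × Int → Bool) (xs : List (String × Int)) (d : PySem.Dict String Int) :
    (xs.foldl (fun d kv => if c kv then d.erase kv.1 else d) d).items
    = d.items.filter (fun p => decide (∀ kv ∈ xs, c kv = true → kv.1 ≠ p.1)) := by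
  induction xs generalizing d with
  | nil => simp
  | cons x xs ih =>
    rw [List.foldl_cons]
    by_cases hc : c x = true
    · rw [if_pos hc, ih]
      show (PySem.Dict.erase d x.1).items.filter _ = _
      simp only [PySem.Dict.erase, List.filter_filter]
      refine List.filter_congr ?_
      intro p _
      by_cases h1 : x.1 = p.1
      · simp [h1, hc]
      · have hne : (p.1 == x.1) = false := by
          simpa using fun e : p.1 = x.1 => h1 e.symm
        simp only [hne, Bool.not_false, Bool.and_true, decide_eq_decide, List.forall_mem_cons, hc]
        constructor
        · intro h
          exact ⟨fun _ => h1, h⟩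
        · intro h
          exact h.2
    · rw [if_neg (by simpa using hc), ih]
      refine List.filter_congr ?_
      intro p _
      simp only [List.mem_cons, decide_eq_decide]
      constructor
      · intro hp kv hkv
        rcases hkv with rfl | hkv
        · intro h; exact absurd h (by simpa using hc)
        · exact hp kv hkv
      · intro hp kv hkv
        exact hp kv (Or.inr hkv)

-- two distinct elements satisfying P give countP ≥ 2
theorem two_le_countP {α : Type} (P : α → Bool) {l : List α} {a b : α}
    (ha : a ∈ l) (hb : b ∈ l) (hne : a ≠ b) (hPa : P a) (hPb : P b) :
    1 < l.countP P := by
  obtain ⟨s, t, rfl⟩ := List.append_of_mem ha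
  have hb' : b ∈ s ++ t := by
    rcases List.mem_append.mp hb with h | h
    · exact List.mem_append.mpr (Or.inl h)
    · rcases List.mem_cons.mp h with rfl | h
      · exact absurd rfl hne
      · exact List.mem_append.mpr (Or.inr h)
    
  have h1 : 0 < (s ++ t).countP P := List.countP_pos_iff.mpr ⟨b, hb', hPb⟩
  rw [List.countP_append] at h1
  rw [List.countP_append, List.countP_cons, hPa, if_pos rfl]
  omega

-- a nodup list whose elements are all equal to a has length ≤ 1
theorem length_le_one_of_nodup_of_forall_eq {α : Type} {l : List α} {a : α}
    (hnd : l.Nodup) (h : ∀ x ∈ l, x = a) : l.length ≤ 1 := by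
  match l with
  | [] => simp
  | [x] => simp
  | x :: y :: t =>
    exfalso
    have hx := h x (by simp)
    have hy := h y (by simp)
    have hx_nm : x ∉ y :: t := (List.nodup_cons.mp hnd).1
    exact hx_nm (by simp [hx, hy])

-- under distinct keys: "some OTHER entry shares p's value" iff the value occurs more than once
theorem other_iff_count (l : List (String × Int)) (p : String × Int)
    (hnd : (l.map Prod.fst).Nodup) (hp : p ∈ l) :
    (∃ q ∈ l, q.1 ≠ p.1 ∧ q.2 = p.2) ↔ 1 < l.countP (fun q => q.2 == p.2) := by
  constructor
  · rintro ⟨q, hq, hqk, hqv⟩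
    exact two_le_countP _ hq hp (fun e => hqk (by rw [e])) (by simp [hqv]) (by simp)
  · intro hcnt
    by_contra hno
    have hall : ∀ x ∈ l.filter (fun q => q.2 == p.2), x = p := by
      intro x hx
      have hxl := (List.mem_filter.mp hx).1
      have hxv : x.2 = p.2 := by simpa using (List.mem_filter.mp hx).2
      have hxk : x.1 = p.1 := by
        by_contra hk
        exact hno ⟨x, hxl, hk, hxv⟩
      exact List.inj_on_of_nodup_map hnd hxl hp hxk
    have hndl : l.Nodup := List.Nodup.of_map _ hnd
    have := length_le_one_of_nodup_of_forall_eq (List.Nodup.filter _ hndl) hall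
    rw [List.countP_eq_length_filter] at hcnt
    omega

-- ===== VERDICT (by name: the statement is the Claim_ definition above) =====
theorem exercise_2_spec : Claim_equal_exercise_2 := by
  intro l _ hnd
  unfold Spec_exercise_2 exercise_2 exercise_2_alt
  -- A's grouping dict
  set dico := l.foldl (fun dico kv =>
      if dico.contains kv.2 = false then dico.insert kv.2 [kv.1]
      else dico.modify kv.2 [] (fun s => s ++ [kv.1])) PySem.Dict.empty with hdico
  have hfold : dico = l.foldl (fun dico kv => dico.modify kv.2 [] (fun s => s ++ [kv.1]))
      PySem.Dict.empty := by
    rw [hdico]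
    exact PySem.List.foldl_congr_mem l _ _ _ (fun acc x _ => stepA_eq_modify acc x)
  have hkeysnd : dico.keys.Nodup := by
    rw [hfold]
    exact PySem.Dict.nodup_keys_foldl_modify_key l Prod.snd [] (fun _ kv => (· ++ [kv.1]))
      PySem.Dict.empty PySem.Dict.nodup_keys_empty
  have hgrp : ∀ g ∈ dico.items, g.2 = (l.filter (fun q => q.2 == g.1)).map Prod.fst := by
    intro g hg
    have := PySem.Dict.getD_of_mem_items dico (k := g.1) (v := g.2) (by simpa using hg) hkeysnd []
    rw [hfold] at this
    rw [← this, dico_getD]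
  have hmemk : ∀ v : Int, v ∈ l.map Prod.snd → v ∈ dico.keys := by
    intro v hv
    rw [hfold, PySem.Dict.keys_foldl_modify_key l Prod.snd [] (fun _ kv => (· ++ [kv.1]))]
    have h1 : PySem.Dict.keys (PySem.Dict.empty : PySem.Dict Int (List String)) = [] := rfl
    rw [h1]
    show v ∈ PySem.Set.update ([] : PySem.Set Int) (l.map Prod.snd)
    have h2 : PySem.Set.update ([] : PySem.Set Int) (l.map Prod.snd)
        = PySem.Set.ofList (l.map Prod.snd) := rfl
    rw [h2, PySem.Set.mem_ofList]
    exact hv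
  -- a group's length is the multiplicity of its value
  have hcntlen : ∀ v : Int, ((l.filter (fun q => q.2 == v)).map Prod.fst).length
      = l.countP (fun q => q.2 == v) := by
    intro v
    rw [List.length_map, List.countP_eq_length_filter]
  rw [foldA_items, foldB_items]
  refine List.filter_congr ?_
  intro p hp
  simp only [decide_eq_decide]
  constructor
  · -- A's predicate → B's
    intro hA kv hkv hckv heq
    have hkvp : kv = p := List.inj_on_of_nodup_map hnd hkv hp heq
    subst hkvp
    obtain ⟨q, hq, hq'⟩ := List.any_eq_true.mp hckv
    have hqk : q.1 ≠ kv.1 := by simpa [bne_iff_ne] using (Bool.and_elim_left hq')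
    have hqv : q.2 = kv.2 := by simpa using (Bool.and_elim_right hq')
    have hcnt : 1 < l.countP (fun q => q.2 == kv.2) :=
      (other_iff_count l kv hnd hp).mp ⟨q, hq, hqk, hqv⟩
    obtain ⟨g, hg, hg1⟩ := List.mem_map.mp (hmemk kv.2 (List.mem_map_of_mem hp))
    have hgl : g.2 = (l.filter (fun q => q.2 == kv.2)).map Prod.fst := by
      rw [hgrp g hg, hg1]
    have hlen : 1 < g.2.length := by rw [hgl, hcntlen]; omega
    have hpmem : kv.1 ∈ g.2 := by
      rw [hgl]
      exact List.mem_map_of_mem (List.mem_filter.mpr ⟨hp, by simp⟩)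
    exact hA g hg hlen hpmem
  · -- B's predicate → A's
    intro hB g hg hlen hpmem
    rw [hgrp g hg] at hpmem hlen
    obtain ⟨q, hq, hq1⟩ := List.mem_map.mp hpmem
    have hql : q ∈ l := (List.mem_filter.mp hq).1
    have hqv : q.2 = g.1 := by simpa using (List.mem_filter.mp hq).2
    have hqp : q = p := List.inj_on_of_nodup_map hnd hql hp hq1
    subst hqp
    have hcnt : 1 < l.countP (fun r => r.2 == q.2) := by
      have := hcntlen g.1
      rw [hqv]
      omega
    obtain ⟨q', hq', hq'k, hq'v⟩ := (other_iff_count l q hnd hp).mpr hcnt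
    refine hB q hp ?_ rfl
    exact List.any_eq_true.mpr ⟨q', hq', by simp [bne_iff_ne, hq'k, hq'v]⟩
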